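-- pv_equiv track=rewrite | github.com/vandeplaslab/image2image | src/image2image/qt/_wsireg/_list.py | get_next_color
-- ===== SOURCE A (Python) =====
-- def get_next_color(n: int, other_colors: list[str] | None = None) -> str:
--     """Get next color based on the number of items."""
--     if other_colors is None:
--         other_colors = []
--     colors = ["#ff0000", "#00ff00", "#0000ff", "#ffff00", "#f00ff", "#00ffff"]
--     if n < len(colors):
--         color = colors[n]
--         if color in other_colors:
--             n += 1
--             return get_next_color(n, other_colors=other_colors)
--         return color
--     return "#808080"
-- ===== SOURCE B (Python) =====
-- def get_next_color(n: int, other_colors: list[str] | None = None) -> str: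
--     """Get next color based on the number of items."""
--     if other_colors is None:
--         other_colors = []
--     colors = ["#ff0000", "#00ff00", "#0000ff", "#ffff00", "#f00ff", "#00ffff"]
--     for i in range(n, len(colors)):
--         color = colors[i]
--         if color not in other_colors:
--             return color
--     return "#808080"
-- ===== Notes on version B (the rewrite author's own statement) =====
-- stated objective: simpler
-- what changed: Replaced the tail recursion with an explicit loop over range(n, len(colors)) that returns the first color not in other_colors, falling back to '#808080' after the loop.
import Mathlib
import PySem

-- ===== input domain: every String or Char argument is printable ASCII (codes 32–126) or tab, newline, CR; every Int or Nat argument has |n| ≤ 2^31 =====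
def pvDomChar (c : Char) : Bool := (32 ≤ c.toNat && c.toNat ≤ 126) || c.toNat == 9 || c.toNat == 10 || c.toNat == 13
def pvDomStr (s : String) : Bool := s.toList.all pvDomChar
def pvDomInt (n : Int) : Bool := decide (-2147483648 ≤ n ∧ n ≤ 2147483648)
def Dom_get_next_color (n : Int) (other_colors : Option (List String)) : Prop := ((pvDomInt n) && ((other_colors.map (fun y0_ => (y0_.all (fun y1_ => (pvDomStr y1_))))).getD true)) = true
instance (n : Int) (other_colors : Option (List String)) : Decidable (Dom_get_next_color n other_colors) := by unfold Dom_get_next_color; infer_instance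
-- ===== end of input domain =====

-- B replaces A's tail recursion by an explicit scan over range(n, len(colors)); objective: simpler.

-- ===== PORT A =====
def pvColors : List String := ["#ff0000", "#00ff00", "#0000ff", "#ffff00", "#f00ff", "#00ffff"]

-- recursion of A: n increases by 1 while n < 6; colors[n] uses Python indexing (pyGet?).
-- 'none' (= IndexError, n < -6) is excluded by Pre_; the port returns "" there.
def pvGoA (n : Int) (other : List String) : String :=
  if n < 6 then
    match PySem.List.pyGet? pvColors n with
    | some c => if c ∈ other then pvGoA (n + 1) other else c
    | none => ""
  else "#808080"
termination_by (6 - n).toNat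
decreasing_by omega

def get_next_color (n : Int) (other_colors : Option (List String)) : String :=
  pvGoA n (other_colors.getD [])

-- ===== PORT B =====
-- loop body of B: first colors[i] with i from the range list that is not in other_colors
def pvGoB (idxs : List Int) (other : List String) : String :=
  match idxs with
  | [] => "#808080"
  | i :: rest =>
    match PySem.List.pyGet? pvColors i with
    | some c => if c ∈ other then pvGoB rest other else c
    | none => ""

def get_next_color_alt (n : Int) (other_colors : Option (List String)) : String :=
  pvGoB (PySem.List.pyRange n 6 1) (other_colors.getD [])

-- ===== PRECONDITION & SPEC =====
-- A raises IndexError (colors[n] with n < -6) exactly when n < -6; both programs raise there.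
def Pre_get_next_color (n : Int) (other_colors : Option (List String)) : Prop := -6 ≤ n
instance (n : Int) (other_colors : Option (List String)) : Decidable (Pre_get_next_color n other_colors) := by unfold Pre_get_next_color; infer_instance
def pvWitness_get_next_color : Int × Option (List String) := (0, some ["#ff0000"])

def Spec_get_next_color (n : Int) (other_colors : Option (List String)) (out : String) : Prop := out = get_next_color_alt n other_colors
instance (n : Int) (other_colors : Option (List String)) (out : String) : Decidable (Spec_get_next_color n other_colors out) := by unfold Spec_get_next_color; infer_instance

-- ===== CLAIM (what is proved, stated in full; the proofs are below) =====
def Claim_equal_get_next_color : Prop := ∀ (n : Int) (other_colors : Option (List String)), Dom_get_next_color n other_colors → Pre_get_next_color n other_colors → Spec_get_next_color n other_colors (get_next_color n other_colors)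

-- ===== LEMMAS AND PROOFS =====
theorem pvAgree (k : Nat) : ∀ (n : Int) (other : List String), (6 - n).toNat = k → -6 ≤ n →
    pvGoA n other = pvGoB (PySem.List.pyRange n 6 1) other := by
  induction k with
  | zero =>
    intro n other hk _
    have h6 : 6 ≤ n := by omega
    rw [pvGoA]
    simp [if_neg (by omega : ¬ n < 6), PySem.List.pyRange_one, (by omega : (6 - n).toNat = 0), pvGoB]
  | succ m ih =>
    intro n other hk hn
    have hlt : n < 6 := by omega
    rw [pvGoA, if_pos hlt, PySem.List.pyRange_one_cons (by omega : n < 6), pvGoB]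
    have hsome : (PySem.List.pyGet? pvColors n).isSome := by
      interval_cases n <;> decide
    obtain ⟨c, hc⟩ := Option.isSome_iff_exists.mp hsome
    rw [hc]
    by_cases hmem : c ∈ other
    · simp [if_pos hmem, ih (n + 1) other (by omega) (by omega)]
    · simp [if_neg hmem]

-- ===== VERDICT (by name: the statement is the Claim_ definition above) =====
theorem get_next_color_spec : Claim_equal_get_next_color := by
  intro n other_colors _ hpre
  unfold Spec_get_next_color get_next_color get_next_color_alt
  exact pvAgree (6 - n).toNat n (other_colors.getD []) rfl hpre
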